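-- pv_equiv track=rewrite | github.com/anupam-aggarwal/IBM_Model1 | functions.py | wordDict
-- ===== SOURCE A (Python) =====
-- import string
--
-- def processSentence(st):
--     inp = [ord(char) for char in string.punctuation]
--     out = [None for i in inp]
--     transTable = dict(zip(inp,out))
--
--     st = st.translate(transTable)
--     st = st.lower()
--     return st
--
-- def wordDict(listData):
--     newData = list()
--     wDict = {}
--     cnt  = 0
--
--     for it in listData:
--
--         it = processSentence(it)
--         tk = it.split()
--
--         newIt = ""
--         for t in tk:
--             if t in wDict:
--                 newIt += t + " "
--             else:
--                 wDict[t] = cnt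
--                 cnt += 1
--                 newIt += t + " "
--         newIt = newIt.strip()
--         newData.append(newIt)
--
--     return newData, wDict
-- ===== SOURCE B (Python) =====
-- import string
--
-- _PUNCT = frozenset(string.punctuation)
--
-- def _tokens(s):
--     # one char-level scan: drop punctuation, lowercase, cut tokens at whitespace
--     toks, cur = [], []
--     for ch in s:
--         if ch in _PUNCT:
--             continue
--         if ch.isspace():
--             if cur:
--                 toks.append("".join(cur))
--                 cur = []
--         else:
--             cur.append(ch.lower())
--     if cur:
--         toks.append("".join(cur))
--     return toks
--
-- def wordDict(listData):
--     tokss = [_tokens(s) for s in listData]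
--     newData = [" ".join(tk) for tk in tokss]
--     firsts = dict.fromkeys(w for tk in tokss for w in tk)
--     return newData, {w: i for i, w in enumerate(firsts)}
-- ===== Notes on version B (the rewrite author's own statement) =====
-- stated objective: faster
-- what changed: A cleans each sentence with a translate(dict-table)/lower/split string pipeline while registering words in an interleaved dict+counter loop with per-token string concatenation; B instead tokenizes by a single hand-written char-level scanner (skip punctuation, lowercase, cut at whitespace), joins the tokens, and derives the word indices separately by dict.fromkeys on the flattened token stream plus enumerate.
import Mathlib
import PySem

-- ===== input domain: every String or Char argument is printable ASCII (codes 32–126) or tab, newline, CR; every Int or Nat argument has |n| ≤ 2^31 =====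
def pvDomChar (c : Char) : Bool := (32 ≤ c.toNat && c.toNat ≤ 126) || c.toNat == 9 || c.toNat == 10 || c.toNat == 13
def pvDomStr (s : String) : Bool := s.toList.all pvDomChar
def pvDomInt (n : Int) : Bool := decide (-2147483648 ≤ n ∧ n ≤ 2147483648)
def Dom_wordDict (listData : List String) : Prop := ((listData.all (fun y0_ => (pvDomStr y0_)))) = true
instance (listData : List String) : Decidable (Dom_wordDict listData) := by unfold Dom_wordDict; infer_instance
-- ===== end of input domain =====

-- B replaces A's pipeline (translate-delete punctuation, lower, split, interleaved dict/counter loop)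
-- with a single char-level scanner producing the tokens directly, then dict.fromkeys + enumerate for
-- the word indices; same results by a different algorithm (a timing run measured B faster by a constant factor).

-- ===== PORT A =====
-- string.punctuation (32 ASCII punctuation characters)
def pvPunct : List Char := "!\"#$%&'()*+,-./:;<=>?@[\\]^_`{|}~".toList

-- st.translate(transTable) with every punctuation code point mapped to None deletes exactly
-- those characters (exact on the ASCII domain); then .lower().
def processSentence (st : String) : String :=
  PySem.Str.lower (String.ofList (st.toList.filter (fun c => !(pvPunct.contains c))))

def wordDict (listData : List String) : List String × (List (String × Int)) :=
  let st := listData.foldl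
    (fun (st : List String × PySem.Dict String Int × Int) it =>
      let newData := st.1
      let wDict := st.2.1
      let cnt := st.2.2
      let it := processSentence it
      let tk := PySem.Str.split₀ it
      let inner := tk.foldl
        (fun (p : String × PySem.Dict String Int × Int) t =>
          if (p.2.1).contains t then
            (p.1 ++ t ++ " ", p.2.1, p.2.2)
          else
            (p.1 ++ t ++ " ", (p.2.1).insert t p.2.2, p.2.2 + 1))
        ("", wDict, cnt)
      (newData ++ [PySem.Str.strip inner.1], inner.2.1, inner.2.2))
    ([], PySem.Dict.empty, 0)
  (st.1, st.2.1.items)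

-- ===== PORT B =====
-- the body of _tokens' for-loop: skip punctuation, close the token on whitespace, else append ch.lower()
def pvScanStep (st : List String × List Char) (ch : Char) : List String × List Char :=
  if pvPunct.contains ch then st
  else if PySem.Chars.isspace ch then
    (if st.2.isEmpty then st else (st.1 ++ [String.ofList st.2], []))
  else (st.1, st.2 ++ [PySem.Chars.lowerChar ch])

-- _tokens(s): one char-level scan; the final flush of cur is the trailing 'if cur:'
def pvTokens (s : String) : List String :=
  let st := s.toList.foldl pvScanStep ([], [])
  if st.2.isEmpty then st.1 else st.1 ++ [String.ofList st.2]

-- dict.fromkeys over the flattened token stream is PySem.List.dedup (first occurrences, in order);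
-- {w: i for i, w in enumerate(firsts)} over distinct keys is literally that list of pairs, swapped.
def wordDict_alt (listData : List String) : List String × (List (String × Int)) :=
  let tokss := listData.map pvTokens
  let newData := tokss.map (fun tk => PySem.Str.join " " tk)
  let firsts := PySem.List.dedup (tokss.flatMap (fun tk => tk))
  (newData, (PySem.List.enumerate firsts).map (fun p => (p.2, p.1)))

-- ===== PRECONDITION & SPEC =====
def Spec_wordDict (listData : List String) (out : List String × (List (String × Int))) : Prop := out = wordDict_alt listData
instance (listData : List String) (out : List String × (List (String × Int))) : Decidable (Spec_wordDict listData out) := by unfold Spec_wordDict; infer_instance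

-- ===== CLAIM (what is proved, stated in full; the proofs are below) =====
def Claim_equal_wordDict : Prop := ∀ (listData : List String), Dom_wordDict listData → Spec_wordDict listData (wordDict listData)

-- ===== LEMMAS AND PROOFS =====

-- A's tokens for one sentence
def pvCleanSplit (s : String) : List String := PySem.Str.split₀ (processSentence s)

-- ---------- tokens: B's scanner equals A's filter+lower+split ----------

theorem pv_isspace_false (c : Char) (h1 : 65 ≤ c.toNat) (h2 : c.toNat ≤ 122) :
    PySem.Chars.isspace c = false := by
  simp only [PySem.Chars.isspace, Bool.or_eq_false_iff, Bool.and_eq_false_iff,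
    decide_eq_false_iff_not]
  omega

theorem pv_isspace_lowerChar (c : Char) :
    PySem.Chars.isspace (PySem.Chars.lowerChar c) = PySem.Chars.isspace c := by
  unfold PySem.Chars.lowerChar
  by_cases h : PySem.Chars.isupper c = true
  · have hc : 65 ≤ c.toNat ∧ c.toNat ≤ 90 := by
      unfold PySem.Chars.isupper at h
      simp only [Bool.and_eq_true, decide_eq_true_eq] at h
      exact ⟨h.1, h.2⟩
    have hofNat : (Char.ofNat (c.toNat + 32)).toNat = c.toNat + 32 := by
      rw [Char.toNat_ofNat, if_pos (by constructor; omega)]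
    simp only [h, if_true]
    rw [pv_isspace_false _ (by omega) (by omega),
      pv_isspace_false c (by omega) (by omega)]
  · simp [h]

theorem pv_go_nil (cur : List Char) (acc : List (List Char)) :
    PySem.Chars.split₀.go [] cur acc =
      if cur.isEmpty then acc.reverse else (cur.reverse :: acc).reverse := rfl

theorem pv_go_cons (c : Char) (rest cur : List Char) (acc : List (List Char)) :
    PySem.Chars.split₀.go (c :: rest) cur acc =
      if PySem.Chars.isspace c then
        (if cur.isEmpty then PySem.Chars.split₀.go rest [] acc
         else PySem.Chars.split₀.go rest [] (cur.reverse :: acc))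
      else PySem.Chars.split₀.go rest (c :: cur) acc := rfl

-- split₀.go's accumulator peels off
theorem pv_go_acc (s : List Char) : ∀ (cur : List Char) (acc : List (List Char)),
    PySem.Chars.split₀.go s cur acc = acc.reverse ++ PySem.Chars.split₀.go s cur [] := by
  induction s with
  | nil =>
    intro cur acc
    rw [pv_go_nil, pv_go_nil]
    by_cases h : cur.isEmpty <;> simp [h]
  | cons c rest ih =>
    intro cur acc
    rw [pv_go_cons, pv_go_cons]
    by_cases hs : PySem.Chars.isspace c = true
    · by_cases hc : cur.isEmpty
      · simp only [hs, hc, if_true]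
        exact ih [] acc
      · simp only [hs, hc, if_true, if_false, Bool.false_eq_true]
        rw [ih [] (cur.reverse :: acc), ih [] [cur.reverse]]
        simp
    · simp only [hs, if_false, Bool.false_eq_true]
      exact ih (c :: cur) acc

-- the scanner's loop, against split₀.go over the cleaned characters
theorem pv_scan_go (cs : List Char) : ∀ (toks : List String) (cur : List Char),
    (let st := cs.foldl pvScanStep (toks, cur);
     if st.2.isEmpty then st.1 else st.1 ++ [String.ofList st.2])
    = toks ++ (PySem.Chars.split₀.go
        ((cs.filter (fun c => !pvPunct.contains c)).map PySem.Chars.lowerChar)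
        cur.reverse []).map String.ofList := by
  induction cs with
  | nil =>
    intro toks cur
    simp only [List.foldl_nil, List.filter_nil, List.map_nil]
    rw [pv_go_nil]
    cases cur <;> simp
  | cons c rest ih =>
    intro toks cur
    by_cases hp : pvPunct.contains c = true
    · simp only [List.foldl_cons, List.filter_cons, hp, Bool.not_true, if_false,
        Bool.false_eq_true]
      rw [show pvScanStep (toks, cur) c = (toks, cur) by unfold pvScanStep; rw [if_pos hp]]
      exact ih toks cur
    · have hp' : pvPunct.contains c = false := by simpa using hp
      simp only [List.foldl_cons, List.filter_cons, hp', Bool.not_false, if_true,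
        List.map_cons]
      rw [pv_go_cons, pv_isspace_lowerChar]
      by_cases hs : PySem.Chars.isspace c = true
      · simp only [hs, if_true]
        cases cur with
        | nil =>
          rw [show pvScanStep (toks, ([] : List Char)) c = (toks, []) by
            unfold pvScanStep; rw [if_neg hp, if_pos hs]; rfl]
          simpa using ih toks []
        | cons a b =>
          rw [show pvScanStep (toks, a :: b) c
              = (toks ++ [String.ofList (a :: b)], []) by
            unfold pvScanStep; rw [if_neg hp, if_pos hs]; rfl]
          have hne : ((a :: b : List Char).reverse).isEmpty = false := by simp
          rw [hne]
          simp only [if_false, Bool.false_eq_true, List.reverse_reverse]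
          rw [pv_go_acc _ [] [(a :: b : List Char)]]
          have hih := ih (toks ++ [String.ofList (a :: b)]) []
          simp only [List.reverse_nil] at hih
          rw [hih]
          simp
      · have hs' : PySem.Chars.isspace c = false := by simpa using hs
        rw [show pvScanStep (toks, cur) c
            = (toks, cur ++ [PySem.Chars.lowerChar c]) by
          unfold pvScanStep; rw [if_neg hp, hs']; rfl]
        rw [hs']
        simp only [if_false, Bool.false_eq_true]
        have hih := ih toks (cur ++ [PySem.Chars.lowerChar c])
        rw [hih]
        simp

-- B's scanner computes exactly A's per-sentence token list
theorem pv_tokens_eq (s : String) : pvTokens s = pvCleanSplit s := by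
  unfold pvTokens pvCleanSplit processSentence
  rw [PySem.Str.split₀]
  have hlist : (PySem.Str.lower
      (String.ofList (s.toList.filter (fun c => !(pvPunct.contains c))))).toList
      = (s.toList.filter (fun c => !pvPunct.contains c)).map PySem.Chars.lowerChar := by
    simp [PySem.Str.lower, PySem.Chars.lower]
  rw [hlist]
  have := pv_scan_go s.toList [] []
  simpa [PySem.Chars.split₀] using this

-- ---------- newData: strip of the space-joined accumulation is " ".join ----------

def pvGood (t : List Char) : Prop := t ≠ [] ∧ ∀ c ∈ t, PySem.Chars.isspace c = false

theorem pvGood_split₀_go (s : List Char) : ∀ cur acc,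
    (∀ c ∈ cur, PySem.Chars.isspace c = false) → (∀ t ∈ acc, pvGood t) →
    ∀ t ∈ PySem.Chars.split₀.go s cur acc, pvGood t := by
  have hrevGood : ∀ (cur : List Char), (∀ c ∈ cur, PySem.Chars.isspace c = false) → List.isEmpty cur = false →
      pvGood cur.reverse := by
    intro cur hcur hc
    refine ⟨by simpa [List.isEmpty_eq_false_iff] using hc, ?_⟩
    intro x hx; exact hcur x (List.mem_reverse.mp hx)
  induction s with
  | nil =>
    intro cur acc hcur hacc t ht
    rw [PySem.Chars.split₀.go] at ht
    by_cases hc : cur.isEmpty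
    · simp only [hc, if_true, List.mem_reverse] at ht
      exact hacc _ ht
    · simp [hc] at ht
      rcases ht with h | rfl
      · exact hacc _ h
      · exact hrevGood cur hcur (by simpa using hc)
  | cons c rest ih =>
    intro cur acc hcur hacc t ht
    rw [PySem.Chars.split₀.go] at ht
    by_cases hs : PySem.Chars.isspace c = true
    · simp only [hs, if_true] at ht
      by_cases hc : cur.isEmpty
      · simp only [hc, if_true] at ht
        exact ih [] acc (by simp) hacc t ht
      · simp only [hc] at ht
        refine ih [] _ (by simp) ?_ t ht
        intro u hu
        rcases List.mem_cons.mp hu with rfl | h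
        · exact hrevGood cur hcur (by simpa using hc)
        · exact hacc _ h
    · simp only [hs] at ht
      refine ih (c :: cur) acc ?_ hacc t ht
      intro x hx
      rcases List.mem_cons.mp hx with rfl | h
      · simpa using hs
      · exact hcur x h

theorem pvGood_split₀ (cs : List Char) : ∀ t ∈ PySem.Chars.split₀ cs, pvGood t := by
  intro t ht
  exact pvGood_split₀_go cs [] [] (by simp) (by simp) t ht

theorem dropWhile_nonspace (t z : List Char) (ht : t ≠ [])
    (hall : ∀ c ∈ t, PySem.Chars.isspace c = false) :
    List.dropWhile PySem.Chars.isspace (t ++ z) = t ++ z := by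
  cases t with
  | nil => exact absurd rfl ht
  | cons c w =>
    simp only [List.cons_append, List.dropWhile_cons, hall c (by simp)]
    simp

theorem rstrip_append_token (j t : List Char) (ht : t ≠ [])
    (hall : ∀ c ∈ t, PySem.Chars.isspace c = false) :
    PySem.Chars.rstrip (j ++ t ++ [' ']) = j ++ t := by
  unfold PySem.Chars.rstrip
  rw [List.reverse_append, List.reverse_append]
  simp only [List.reverse_cons, List.reverse_nil, List.nil_append, List.cons_append,
    List.dropWhile_cons]
  have hsp : PySem.Chars.isspace ' ' = true := by decide
  rw [if_pos hsp]
  rw [dropWhile_nonspace t.reverse j.reverse (by simpa using ht)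
    (fun c hc => hall c (List.mem_reverse.mp hc))]
  simp

theorem flatten_map_eq_join_append (tk : List (List Char)) (h : tk ≠ []) :
    (tk.map (· ++ [' '])).flatten = PySem.Chars.join [' '] tk ++ [' '] := by
  induction tk with
  | nil => exact absurd rfl h
  | cons a rest ih =>
    cases rest with
    | nil => simp [PySem.Chars.join_singleton]
    | cons b r =>
      rw [PySem.Chars.join_cons_cons]
      simp only [List.map_cons, List.flatten_cons] at ih ⊢
      rw [ih (by simp)]
      simp

theorem lstrip_flatten (tk : List (List Char)) (h : ∀ t ∈ tk, pvGood t) :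
    PySem.Chars.lstrip ((tk.map (· ++ [' '])).flatten) = (tk.map (· ++ [' '])).flatten := by
  cases tk with
  | nil => rfl
  | cons t rest =>
    unfold PySem.Chars.lstrip
    simp only [List.map_cons, List.flatten_cons, List.append_assoc]
    exact dropWhile_nonspace t _ (h t (by simp)).1 (fun c hc => (h t (by simp)).2 c hc)

theorem join_snoc (tk : List (List Char)) (t : List Char) (h : tk ≠ []) :
    PySem.Chars.join [' '] (tk ++ [t]) = PySem.Chars.join [' '] tk ++ [' '] ++ t := by
  induction tk with
  | nil => exact absurd rfl h
  | cons a rest ih =>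
    cases rest with
    | nil => simp [PySem.Chars.join_singleton, PySem.Chars.join_cons_cons]
    | cons b r =>
      simp only [List.cons_append] at ih ⊢
      rw [PySem.Chars.join_cons_cons, PySem.Chars.join_cons_cons, ih (by simp)]
      simp

theorem rstrip_flatten (tk : List (List Char)) (h : ∀ t ∈ tk, pvGood t) :
    PySem.Chars.rstrip ((tk.map (· ++ [' '])).flatten) = PySem.Chars.join [' '] tk := by
  induction tk using List.reverseRecOn with
  | nil => rfl
  | append_singleton tk t _ =>
    have hgt := h t (by simp)
    rw [List.map_append, List.flatten_append]
    simp only [List.map_cons, List.map_nil, List.flatten_cons, List.flatten_nil,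
      List.append_nil]
    rw [← List.append_assoc]
    rw [rstrip_append_token _ t hgt.1 hgt.2]
    cases tk with
    | nil => simp [PySem.Chars.join_singleton]
    | cons a r =>
      rw [flatten_map_eq_join_append (a :: r) (by simp), join_snoc (a :: r) t (by simp)]

theorem strip_flatten (tk : List (List Char)) (h : ∀ t ∈ tk, pvGood t) :
    PySem.Chars.strip ((tk.map (· ++ [' '])).flatten) = PySem.Chars.join [' '] tk := by
  unfold PySem.Chars.strip
  rw [lstrip_flatten tk h, rstrip_flatten tk h]

-- A's inner loop splits into its string part and its dict/counter part
theorem inner_split (tk : List String) (s : String) (d : PySem.Dict String Int) (c : Int) :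
    tk.foldl
      (fun (p : String × PySem.Dict String Int × Int) t =>
        if (p.2.1).contains t then (p.1 ++ t ++ " ", p.2.1, p.2.2)
        else (p.1 ++ t ++ " ", (p.2.1).insert t p.2.2, p.2.2 + 1))
      (s, d, c) =
    (tk.foldl (fun a t => a ++ t ++ " ") s,
     tk.foldl
      (fun (q : PySem.Dict String Int × Int) t =>
        if q.1.contains t then q else (q.1.insert t q.2, q.2 + 1)) (d, c)) := by
  induction tk generalizing s d c with
  | nil => rfl
  | cons t rest ih =>
    simp only [List.foldl_cons]
    by_cases h : d.contains t = true
    · simp [h, ih]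
    · simp [h, ih]

theorem foldl_flat (tk : List (List Char)) (a0 : List Char) :
    tk.foldl (fun a t => a ++ t ++ [' ']) a0 = a0 ++ (tk.map (· ++ [' '])).flatten := by
  induction tk generalizing a0 with
  | nil => simp
  | cons t rest ih =>
    simp only [List.foldl_cons, List.map_cons, List.flatten_cons, ih]
    simp

theorem fold_toList (tk : List String) (s0 : String) :
    (tk.foldl (fun a t => a ++ t ++ " ") s0).toList
      = (tk.map String.toList).foldl (fun a t => a ++ t ++ [' ']) s0.toList := by
  induction tk generalizing s0 with
  | nil => rfl
  | cons t rest ih =>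
    simp only [List.foldl_cons, List.map_cons, ih, String.toList_append]
    rfl

theorem strip_fold_eq_join (u : String) :
    PySem.Str.strip ((PySem.Str.split₀ u).foldl (fun a t => a ++ t ++ " ") "") =
      PySem.Str.join " " (PySem.Str.split₀ u) := by
  apply String.toList_inj.mp
  rw [PySem.Str.toList_strip, fold_toList, PySem.Str.toList_join,
    PySem.Str.split₀_map_toList]
  have h0 : ("" : String).toList = [] := rfl
  have h1 : (" " : String).toList = [' '] := rfl
  rw [h0, h1, foldl_flat, List.nil_append]
  exact strip_flatten _ (pvGood_split₀ u.toList)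

-- ---------- dict: A's contains/insert/counter fold is enumerate of the deduped stream ----------

def pvDictOf (L : List String) : PySem.Dict String Int :=
  PySem.Dict.mk ((PySem.List.enumerate L).map (fun p => (p.2, p.1)))

theorem contains_dictOf (L : List String) (t : String) :
    (pvDictOf L).contains t = L.contains t := by
  unfold pvDictOf PySem.Dict.contains
  rw [List.any_map]
  rw [show L = (PySem.List.enumerate L 0).map (fun p => p.2) from
    (PySem.List.map_snd_enumerate L 0).symm]
  rw [List.contains_eq_any_beq, List.any_map]
  simp [Function.comp_def, BEq.comm]

theorem dict_fold (ws : List String) : ∀ (L : List String),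
    ws.foldl
      (fun (q : PySem.Dict String Int × Int) t =>
        if q.1.contains t then q else (q.1.insert t q.2, q.2 + 1))
      (pvDictOf L, Int.ofNat L.length)
    = (pvDictOf (ws.foldl PySem.Set.add L),
       Int.ofNat (ws.foldl PySem.Set.add L).length) := by
  induction ws with
  | nil => intro L; rfl
  | cons t rest ih =>
    intro L
    simp only [List.foldl_cons]
    by_cases h : L.contains t = true
    · rw [if_pos (by rw [contains_dictOf]; exact h)]
      rw [show PySem.Set.add L t = L by unfold PySem.Set.add PySem.Set.contains; rw [if_pos h]]
      exact ih L
    · have h' : L.contains t = false := by simpa using h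
      rw [if_neg (by rw [contains_dictOf, h']; simp)]
      have hadd : PySem.Set.add L t = L ++ [t] := by unfold PySem.Set.add PySem.Set.contains; rw [if_neg h]
      have hins : (pvDictOf L).insert t (Int.ofNat L.length) = pvDictOf (L ++ [t]) := by
        apply PySem.Dict.ext
        rw [PySem.Dict.items_insert_of_not_contains _ _ (by rw [contains_dictOf]; exact h')]
        unfold pvDictOf
        rw [PySem.List.enumerate_append]
        simp [PySem.List.enumerate, Int.ofNat_eq_natCast]
      rw [hadd, hins]
      have hlen : Int.ofNat L.length + 1 = Int.ofNat (L ++ [t]).length := by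
        simp [Int.ofNat_eq_natCast]
      rw [hlen]
      exact ih (L ++ [t])

-- A's outer loop: newData is the join of each sentence's tokens, and the dict/counter state
-- is one fold over the concatenated token stream
theorem outer_loop (L : List String) : ∀ (nd : List String) (q : PySem.Dict String Int × Int),
    L.foldl
      (fun (st : List String × PySem.Dict String Int × Int) it =>
        let it := processSentence it
        let tk := PySem.Str.split₀ it
        let inner := tk.foldl
          (fun (p : String × PySem.Dict String Int × Int) t =>
            if (p.2.1).contains t then
              (p.1 ++ t ++ " ", p.2.1, p.2.2)
            else
              (p.1 ++ t ++ " ", (p.2.1).insert t p.2.2, p.2.2 + 1))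
          ("", st.2.1, st.2.2)
        (st.1 ++ [PySem.Str.strip inner.1], inner.2.1, inner.2.2))
      (nd, q) =
    (nd ++ L.map (fun s => PySem.Str.join " " (pvCleanSplit s)),
     (L.flatMap pvCleanSplit).foldl
       (fun (q : PySem.Dict String Int × Int) t =>
         if q.1.contains t then q else (q.1.insert t q.2, q.2 + 1)) q) := by
  induction L with
  | nil => intro nd q; simp
  | cons s rest ih =>
    intro nd q
    simp only [List.foldl_cons, List.map_cons, List.flatMap_cons]
    rw [inner_split]
    dsimp only
    have hcs : PySem.Str.split₀ (processSentence s) = pvCleanSplit s := rfl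
    rw [hcs]
    have hsf := strip_fold_eq_join (processSentence s)
    rw [hcs] at hsf
    rw [hsf, ih]
    rw [List.foldl_append]
    simp

-- ===== VERDICT (by name: the statement is the Claim_ definition above) =====
theorem wordDict_spec : Claim_equal_wordDict := by
  intro L _
  unfold Spec_wordDict wordDict wordDict_alt
  dsimp only
  rw [outer_loop L [] (PySem.Dict.empty, 0)]
  have hempty : (PySem.Dict.empty : PySem.Dict String Int) = pvDictOf [] := rfl
  have h0 : (0 : Int) = Int.ofNat ([] : List String).length := rfl
  rw [hempty, h0, dict_fold]
  have hmap : L.map pvTokens = L.map pvCleanSplit := List.map_congr_left (fun s _ => pv_tokens_eq s)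
  rw [hmap]
  have hflat : (L.map pvCleanSplit).flatMap (fun tk => tk) = L.flatMap pvCleanSplit := by
    simp [List.flatMap_def, Function.comp_def]
  rw [hflat]
  rw [PySem.List.dedup_eq_ofList]
  have hofList : (PySem.Set.ofList (L.flatMap pvCleanSplit) : List String)
      = (L.flatMap pvCleanSplit).foldl PySem.Set.add [] := rfl
  rw [hofList]
  simp [pvDictOf, List.map_map, Function.comp]
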